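-- pv_equiv track=rewrite | github.com/invidtiv/beever-atlas | src/beever_atlas/wiki/compiler.py | _render_overview_tools
-- ===== SOURCE A (Python) =====
-- _GENERIC_TOOLS = {
--     "slack",
--     "whatsapp",
--     "imessage",
--     "x",
--     "twitter",
--     "macos",
--     "linux",
--     "windows",
--     "vs code",
--     "vscode",
--     "github",
-- }
--
-- def _render_overview_tools(tech_data: list[dict], project_data: list[dict]) -> str:
--     tools: list[str] = []
--     seen: set[str] = set()
--     for t in tech_data or []:
--         name = (t.get("name") or "").strip()
--         if not name or name.lower() in _GENERIC_TOOLS: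
--             continue
--         if name.lower() in seen:
--             continue
--         seen.add(name.lower())
--         tools.append(name)
--         if len(tools) >= 10:
--             break
--     for p in project_data or []:
--         if len(tools) >= 10:
--             break
--         name = (p.get("name") or "").strip()
--         if not name or name.lower() in seen:
--             continue
--         seen.add(name.lower())
--         tools.append(name)
--     if not tools:
--         return ""
--     lines = ["## Tools & resources", ""]
--     for name in tools:
--         lines.append(f"- {name}")
--     return "\n".join(lines)
-- ===== SOURCE B (Python) =====
-- _GENERIC_TOOLS = {
--     "slack",
--     "whatsapp",
--     "imessage",
--     "x",
--     "twitter",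
--     "macos",
--     "linux",
--     "windows",
--     "vs code",
--     "vscode",
--     "github",
-- }
--
-- def _dedup(names):
--     # recursive case-insensitive dedup: keep the head, drop its later duplicates
--     if not names:
--         return []
--     head = names[0]
--     return [head] + _dedup([n for n in names[1:] if n.lower() != head.lower()])
--
-- def _render_overview_tools(tech_data: list[dict], project_data: list[dict]) -> str:
--     cands = [n for t in (tech_data or [])
--              if (n := (t.get("name") or "").strip())
--              and n.lower() not in _GENERIC_TOOLS]
--     cands += [n for p in (project_data or [])
--               if (n := (p.get("name") or "").strip())]
--     tools = _dedup(cands)[:10]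
--     if not tools:
--         return ""
--     return "\n".join(["## Tools & resources", ""] + [f"- {n}" for n in tools])
-- ===== Notes on version B (the rewrite author's own statement) =====
-- stated objective: alternative
-- what changed: B replaces A's two interleaved seen-set/cap loops with a staged pipeline: gather all candidates, deduplicate by a recursive remove-later-duplicates function (no seen set, no break), and apply the 10-item cap as a final slice.
import Mathlib
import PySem

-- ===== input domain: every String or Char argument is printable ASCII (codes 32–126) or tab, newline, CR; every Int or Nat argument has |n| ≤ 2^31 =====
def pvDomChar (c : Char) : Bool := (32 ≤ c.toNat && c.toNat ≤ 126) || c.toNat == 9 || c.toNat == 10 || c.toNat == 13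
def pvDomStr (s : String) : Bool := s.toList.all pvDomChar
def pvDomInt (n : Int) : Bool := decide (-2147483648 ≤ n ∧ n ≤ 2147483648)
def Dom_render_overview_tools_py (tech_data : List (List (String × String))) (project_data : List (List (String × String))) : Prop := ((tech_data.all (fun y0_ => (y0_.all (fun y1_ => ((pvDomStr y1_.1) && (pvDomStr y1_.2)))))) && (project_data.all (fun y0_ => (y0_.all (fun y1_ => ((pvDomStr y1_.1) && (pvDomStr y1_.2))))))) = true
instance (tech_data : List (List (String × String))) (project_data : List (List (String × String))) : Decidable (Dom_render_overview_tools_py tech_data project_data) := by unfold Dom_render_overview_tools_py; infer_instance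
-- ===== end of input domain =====

-- ===== PORT A =====
-- B stages the work (gather all candidates, recursive remove-later-duplicates dedup, cap by slice) instead of A's two interleaved seen-set/cap loops; same results, B is quadratic in the candidate count.
-- shared helper: name = (row.get("name") or "").strip()
def pvName (row : List (String × String)) : String :=
  PySem.Str.strip ((row.lookup "name").getD "")

-- shared constant: _GENERIC_TOOLS
def pvGenericTools : PySem.Set String :=
  PySem.Set.ofList ["slack", "whatsapp", "imessage", "x", "twitter", "macos",
                    "linux", "windows", "vs code", "vscode", "github"]

-- first loop of A: tech rows, generic filter, dedup, break once 10 collected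
def pvLoopA1 : List (List (String × String)) → List String → PySem.Set String →
    List String × PySem.Set String
  | [], tools, seen => (tools, seen)
  | t :: rest, tools, seen =>
    let name := pvName t
    if name = "" ∨ PySem.Set.contains pvGenericTools (PySem.Str.lower name) then
      pvLoopA1 rest tools seen
    else if PySem.Set.contains seen (PySem.Str.lower name) then
      pvLoopA1 rest tools seen
    else
      let seen' := PySem.Set.add seen (PySem.Str.lower name)
      let tools' := tools ++ [name]
      if 10 ≤ tools'.length then (tools', seen') else pvLoopA1 rest tools' seen'

-- second loop of A: project rows, cap check at the top, dedup, no generic filter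
def pvLoopA2 : List (List (String × String)) → List String → PySem.Set String → List String
  | [], tools, _ => tools
  | p :: rest, tools, seen =>
    if 10 ≤ tools.length then tools
    else
      let name := pvName p
      if name = "" ∨ PySem.Set.contains seen (PySem.Str.lower name) then
        pvLoopA2 rest tools seen
      else
        pvLoopA2 rest (tools ++ [name]) (PySem.Set.add seen (PySem.Str.lower name))

def pvRender (tools : List String) : String :=
  if tools = [] then ""
  else PySem.Str.join "\n" (["## Tools & resources", ""] ++ tools.map (fun name => "- " ++ name))

def render_overview_tools_py (tech_data : List (List (String × String))) (project_data : List (List (String × String))) : String :=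
  let r1 := pvLoopA1 tech_data [] PySem.Set.empty
  pvRender (pvLoopA2 project_data r1.1 r1.2)

-- ===== PORT B =====
-- candidates: stripped non-empty tech names not in _GENERIC_TOOLS, then stripped non-empty project names
def pvAltCandidates (tech_data project_data : List (List (String × String))) : List String :=
  ((tech_data.map pvName).filter
      (fun n => ¬ (n = "" ∨ PySem.Set.contains pvGenericTools (PySem.Str.lower n))))
  ++ ((project_data.map pvName).filter (fun n => ¬ n = ""))

-- _dedup: keep the head, recurse on the tail with the head's case-insensitive duplicates removed
def pvDedupRec : List String → List String
  | [] => []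
  | head :: rest =>
      head :: pvDedupRec (rest.filter (fun n => PySem.Str.lower n != PySem.Str.lower head))
termination_by l => l.length
decreasing_by simpa using Nat.lt_succ_of_le (List.length_filter_le _ _)

def render_overview_tools_py_alt (tech_data : List (List (String × String))) (project_data : List (List (String × String))) : String :=
  let tools := PySem.List.slice (pvDedupRec (pvAltCandidates tech_data project_data)) none (some 10)
  pvRender tools

-- ===== PRECONDITION & SPEC =====
def Spec_render_overview_tools_py (tech_data : List (List (String × String))) (project_data : List (List (String × String))) (out : String) : Prop := out = render_overview_tools_py_alt tech_data project_data
instance (tech_data : List (List (String × String))) (project_data : List (List (String × String))) (out : String) : Decidable (Spec_render_overview_tools_py tech_data project_data out) := by unfold Spec_render_overview_tools_py; infer_instance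

-- ===== CLAIM (what is proved, stated in full; the proofs are below) =====
def Claim_equal_render_overview_tools_py : Prop := ∀ (tech_data : List (List (String × String))) (project_data : List (List (String × String))), Dom_render_overview_tools_py tech_data project_data → Spec_render_overview_tools_py tech_data project_data (render_overview_tools_py tech_data project_data)

-- ===== LEMMAS AND PROOFS =====

-- proof-only intermediate: A's dedup/cap behaviour fused into one loop over a candidate list
def pvMidDedup : List String → PySem.Set String → List String → List String
  | [], _, tools => tools
  | name :: rest, seen, tools =>
    let low := PySem.Str.lower name
    if PySem.Set.contains seen low then pvMidDedup rest seen tools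
    else
      let seen' := PySem.Set.add seen low
      let tools' := tools ++ [name]
      if tools'.length = 10 then tools' else pvMidDedup rest seen' tools'

-- A's first loop never grows the collected list past 10
theorem pvLoopA1_len_le (rows : List (List (String × String))) (tools : List String)
    (seen : PySem.Set String) (h : tools.length < 10) :
    (pvLoopA1 rows tools seen).1.length ≤ 10 := by
  induction rows generalizing tools seen with
  | nil => simpa [pvLoopA1] using Nat.le_of_lt h
  | cons t rest ih =>
    simp only [pvLoopA1]
    split_ifs with h1 h2 h3
    · exact ih tools seen h
    · exact ih tools seen h
    · simp only [List.length_append, List.length_cons, List.length_nil]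
      omega
    · refine ih _ _ ?_
      simp only [List.length_append, List.length_cons, List.length_nil] at h3
      simp only [List.length_append, List.length_cons, List.length_nil]
      omega

-- A's second loop returns its accumulator untouched once the cap is reached
theorem pvLoopA2_capped (rows : List (List (String × String))) (tools : List String)
    (seen : PySem.Set String) (h : 10 ≤ tools.length) :
    pvLoopA2 rows tools seen = tools := by
  cases rows with
  | nil => rfl
  | cons p rest => simp [pvLoopA2, h]

-- fusing the intermediate pass over the tech candidates with A's first loop
theorem pvDedup_tech (rows : List (List (String × String))) (ys : List String)
    (tools : List String) (seen : PySem.Set String) (h : tools.length < 10) :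
    pvMidDedup
      (((rows.map pvName).filter
          (fun n => ¬ (n = "" ∨ PySem.Set.contains pvGenericTools (PySem.Str.lower n)))) ++ ys)
      seen tools
    = (if (pvLoopA1 rows tools seen).1.length = 10 then (pvLoopA1 rows tools seen).1
       else pvMidDedup ys (pvLoopA1 rows tools seen).2 (pvLoopA1 rows tools seen).1) := by
  induction rows generalizing tools seen with
  | nil => simp [pvLoopA1, Nat.ne_of_lt h]
  | cons t rest ih =>
    rw [List.map_cons, List.filter_cons]
    simp only [pvLoopA1]
    by_cases h1 : pvName t = "" ∨ PySem.Set.contains pvGenericTools (PySem.Str.lower (pvName t))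
    · rw [decide_eq_false (not_not_intro h1), if_neg Bool.false_ne_true, if_pos h1]
      exact ih tools seen h
    · rw [decide_eq_true h1, if_pos rfl, List.cons_append, if_neg h1]
      by_cases h2 : PySem.Set.contains seen (PySem.Str.lower (pvName t))
      · simp only [pvMidDedup]
        rw [if_pos h2, if_pos h2]
        exact ih tools seen h
      · simp only [pvMidDedup]
        rw [if_neg h2, if_neg h2]
        by_cases h3 : (tools ++ [pvName t]).length = 10
        · rw [if_pos (Nat.le_of_eq h3.symm)]
          simp [h3]
        · have h3' : ¬ 10 ≤ (tools ++ [pvName t]).length := by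
            simp only [List.length_append, List.length_cons, List.length_nil] at h3 ⊢
            omega
          rw [if_neg h3, if_neg h3']
          refine ih _ _ ?_
          simp only [List.length_append, List.length_cons, List.length_nil] at h3 ⊢
          omega

-- fusing the intermediate pass over the project candidates with A's second loop
theorem pvDedup_proj (rows : List (List (String × String))) (tools : List String)
    (seen : PySem.Set String) (h : tools.length < 10) :
    pvLoopA2 rows tools seen
      = pvMidDedup ((rows.map pvName).filter (fun n => ¬ n = "")) seen tools := by
  induction rows generalizing tools seen with
  | nil => rfl
  | cons p rest ih =>
    have hcap : ¬ 10 ≤ tools.length := Nat.not_le_of_lt h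
    rw [List.map_cons, List.filter_cons]
    simp only [pvLoopA2]
    rw [if_neg hcap]
    by_cases h1 : pvName p = ""
    · rw [decide_eq_false (not_not_intro h1), if_neg Bool.false_ne_true, if_pos (Or.inl h1)]
      exact ih tools seen h
    · rw [decide_eq_true h1, if_pos rfl]
      simp only [pvMidDedup]
      by_cases h2 : PySem.Set.contains seen (PySem.Str.lower (pvName p))
      · rw [if_pos (Or.inr h2), if_pos h2]
        exact ih tools seen h
      · rw [if_neg (by tauto), if_neg h2]
        by_cases h3 : (tools ++ [pvName p]).length = 10
        · rw [if_pos h3]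
          exact pvLoopA2_capped rest _ _ (Nat.le_of_eq h3.symm)
        · rw [if_neg h3]
          refine ih _ _ ?_
          simp only [List.length_append, List.length_cons, List.length_nil] at h3 ⊢
          omega

-- membership in an added set, as a Bool equation
theorem pvContains_add (s : PySem.Set String) (a x : String) :
    PySem.Set.contains (PySem.Set.add s a) x = (PySem.Set.contains s x || x == a) := by
  rw [Bool.eq_iff_iff]
  simp [PySem.Set.mem_add]

-- the seen-set loop computes: recursive dedup of the unseen candidates, capped
theorem pvMid_eq_rec (l : List String) (seen : PySem.Set String) (tools : List String)
    (h : tools.length < 10) :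
    pvMidDedup l seen tools
      = tools ++ (pvDedupRec (l.filter
          (fun n => !(PySem.Set.contains seen (PySem.Str.lower n))))).take (10 - tools.length) := by
  induction l generalizing seen tools with
  | nil => simp [pvMidDedup, pvDedupRec]
  | cons name rest ih =>
    simp only [pvMidDedup]
    by_cases h2 : PySem.Set.contains seen (PySem.Str.lower name)
    · rw [if_pos h2]
      have hcons : (name :: rest).filter (fun n => !(PySem.Set.contains seen (PySem.Str.lower n)))
          = rest.filter (fun n => !(PySem.Set.contains seen (PySem.Str.lower n))) := by
        simp only [List.filter_cons, h2, Bool.not_true, Bool.false_eq_true, if_false]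
      rw [hcons]
      exact ih seen tools h
    · rw [if_neg h2]
      have hcons : (name :: rest).filter (fun n => !(PySem.Set.contains seen (PySem.Str.lower n)))
          = name :: rest.filter (fun n => !(PySem.Set.contains seen (PySem.Str.lower n))) := by
        simp only [List.filter_cons, Bool.not_eq_eq_eq_not, Bool.not_true]
        rw [if_pos (Bool.eq_false_iff.mpr h2)]
      have hrec : pvDedupRec (name :: rest.filter
            (fun n => !(PySem.Set.contains seen (PySem.Str.lower n))))
          = name :: pvDedupRec ((rest.filter
              (fun n => !(PySem.Set.contains seen (PySem.Str.lower n)))).filter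
              (fun n => PySem.Str.lower n != PySem.Str.lower name)) := by
        rw [pvDedupRec]
      have hpred : ((rest.filter
            (fun n => !(PySem.Set.contains seen (PySem.Str.lower n)))).filter
            (fun n => PySem.Str.lower n != PySem.Str.lower name))
          = rest.filter (fun n => !(PySem.Set.contains
              (PySem.Set.add seen (PySem.Str.lower name)) (PySem.Str.lower n))) := by
        rw [List.filter_filter]
        apply List.filter_congr
        intro n _
        rw [pvContains_add, Bool.not_or, Bool.and_comm]
        rfl
      rw [hcons, hrec, hpred]
      by_cases h3 : (tools ++ [name]).length = 10
      · rw [if_pos h3]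
        have h9 : tools.length = 9 := by
          simp only [List.length_append, List.length_cons, List.length_nil] at h3; omega
        rw [show 10 - tools.length = 1 from by omega]
        simp
      · rw [if_neg h3, ih _ _ (by
          simp only [List.length_append, List.length_cons, List.length_nil] at h3 ⊢; omega)]
        have hk : 10 - tools.length = (10 - (tools ++ [name]).length) + 1 := by
          simp only [List.length_append, List.length_cons, List.length_nil] at h3 ⊢; omega
        rw [hk, List.take_succ_cons, List.append_assoc]
        rfl

-- ===== VERDICT (by name: the statement is the Claim_ definition above) =====
theorem render_overview_tools_py_spec : Claim_equal_render_overview_tools_py := by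
  intro tech proj _
  have key : pvLoopA2 proj (pvLoopA1 tech [] PySem.Set.empty).1 (pvLoopA1 tech [] PySem.Set.empty).2
      = pvMidDedup (pvAltCandidates tech proj) PySem.Set.empty [] := by
    unfold pvAltCandidates
    rw [pvDedup_tech tech _ [] PySem.Set.empty (by simp)]
    by_cases hc : (pvLoopA1 tech [] PySem.Set.empty).1.length = 10
    · rw [if_pos hc]
      exact pvLoopA2_capped _ _ _ (Nat.le_of_eq hc.symm)
    · rw [if_neg hc]
      have hle := pvLoopA1_len_le tech [] PySem.Set.empty (by simp)
      exact pvDedup_proj proj _ _ (by omega)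
  have mid : pvMidDedup (pvAltCandidates tech proj) PySem.Set.empty []
      = (pvDedupRec (pvAltCandidates tech proj)).take 10 := by
    rw [pvMid_eq_rec _ _ _ (by simp)]
    simp [PySem.Set.empty, PySem.Set.contains]
  show pvRender (pvLoopA2 proj (pvLoopA1 tech [] PySem.Set.empty).1
      (pvLoopA1 tech [] PySem.Set.empty).2)
    = render_overview_tools_py_alt tech proj
  rw [key, mid]
  unfold render_overview_tools_py_alt
  rw [PySem.List.slice_to _ (by norm_num)]
  rfl
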